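-- pv_equiv track=rewrite | github.com/Manojkumarmk26/chatwithpdf | backend/document_processor/ocr_processor.py | _extract_cells_by_position
-- ===== SOURCE A (Python) =====
-- from typing import Dict, List, Any, Tuple
--
-- def _extract_cells_by_position(line: str, positions: List[int]) -> List[str]:
--     """Extract cells based on column positions"""
--     cells = []
--     start = 0
--
--     for pos in positions:
--         if pos > start and pos < len(line):
--             cell = line[start:pos].strip()
--             if cell:
--                 cells.append(cell)
--             start = pos
--
--     # Add last cell
--     if start < len(line):
--         cell = line[start:].strip()
--         if cell:
--             cells.append(cell)
--
--     return cells
-- ===== SOURCE B (Python) =====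
-- from typing import List
--
-- def _extract_cells_by_position(line: str, positions: List[int]) -> List[str]:
--     """Extract cells based on column positions (boundary-list decomposition)."""
--     n = len(line)
--     boundaries = []
--     last = 0
--     for pos in positions:
--         if last < pos < n:
--             boundaries.append(pos)
--             last = pos
--     boundaries.append(n)
--     cells = []
--     a = 0
--     for b in boundaries:
--         cell = line[a:b].strip()
--         if cell:
--             cells.append(cell)
--         a = b
--     return cells
-- ===== Notes on version B (the rewrite author's own statement) =====
-- stated objective: alternative
-- what changed: Replaces A's single slice-as-you-go loop by a two-phase decomposition: first compute the accepted column boundaries as a list, then cut the line at consecutive boundary pairs (with len(line) as terminal edge), stripping and keeping non-empty pieces.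
import Mathlib
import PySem

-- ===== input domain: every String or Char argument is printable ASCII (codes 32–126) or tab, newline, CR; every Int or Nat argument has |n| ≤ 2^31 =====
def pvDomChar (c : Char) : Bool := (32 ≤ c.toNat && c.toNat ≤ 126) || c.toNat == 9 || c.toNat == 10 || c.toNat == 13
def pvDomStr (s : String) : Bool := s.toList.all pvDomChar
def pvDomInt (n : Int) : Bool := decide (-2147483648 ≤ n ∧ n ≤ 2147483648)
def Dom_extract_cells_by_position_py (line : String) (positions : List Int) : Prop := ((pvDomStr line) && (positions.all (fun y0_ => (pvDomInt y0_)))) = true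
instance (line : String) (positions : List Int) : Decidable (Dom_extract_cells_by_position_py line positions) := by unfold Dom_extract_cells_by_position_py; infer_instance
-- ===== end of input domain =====

-- B replaces A's slice-as-you-go loop by a two-phase decomposition (boundary list, then cut at
-- consecutive boundary pairs); same cost, proved to return the identical cell list.


-- ===== PORT A =====
-- loop 'for pos in positions' threading (cells, start), then the final '[start:]' cell
def pvAGo (cs : List Char) (positions : List Int) (cells : List String) (start : Int) : List String :=
  match positions with
  | [] =>
    if start < (cs.length : Int) then
      let cell := PySem.Chars.strip (PySem.List.slice cs (some start) none)
      if cell ≠ [] then cells ++ [String.ofList cell] else cells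
    else cells
  | p :: ps =>
    if p > start ∧ p < (cs.length : Int) then
      let cell := PySem.Chars.strip (PySem.List.slice cs (some start) (some p))
      pvAGo cs ps (if cell ≠ [] then cells ++ [String.ofList cell] else cells) p
    else
      pvAGo cs ps cells start

def extract_cells_by_position_py (line : String) (positions : List Int) : List String :=
  pvAGo line.toList positions [] 0

-- ===== PORT B =====
-- phase 1: greedy boundary list
def pvBBounds (n : Int) (positions : List Int) (last : Int) : List Int :=
  match positions with
  | [] => []
  | p :: ps => if last < p ∧ p < n then p :: pvBBounds n ps p else pvBBounds n ps last

-- phase 2: cut the line at consecutive edges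
def pvBCut (cs : List Char) (cells : List String) (a : Int) (edges : List Int) : List String :=
  match edges with
  | [] => cells
  | b :: rest =>
    let cell := PySem.Chars.strip (PySem.List.slice cs (some a) (some b))
    pvBCut cs (if cell ≠ [] then cells ++ [String.ofList cell] else cells) b rest

def extract_cells_by_position_py_alt (line : String) (positions : List Int) : List String :=
  let cs := line.toList
  pvBCut cs [] 0 (pvBBounds (cs.length : Int) positions 0 ++ [(cs.length : Int)])

-- ===== PRECONDITION & SPEC =====
def Spec_extract_cells_by_position_py (line : String) (positions : List Int) (out : List String) : Prop := out = extract_cells_by_position_py_alt line positions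
instance (line : String) (positions : List Int) (out : List String) : Decidable (Spec_extract_cells_by_position_py line positions out) := by unfold Spec_extract_cells_by_position_py; infer_instance

-- ===== CLAIM (what is proved, stated in full; the proofs are below) =====
def Claim_equal_extract_cells_by_position_py : Prop := ∀ (line : String) (positions : List Int), Dom_extract_cells_by_position_py line positions → Spec_extract_cells_by_position_py line positions (extract_cells_by_position_py line positions)

-- ===== LEMMAS AND PROOFS =====

-- A's whole slice 'line[start:]' equals B's bounded slice 'line[start:n]' for 0 ≤ start
lemma pv_slice_from_eq_to_len (cs : List Char) (s : Int) (hs : 0 ≤ s) :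
    PySem.List.slice cs (some s) none = PySem.List.slice cs (some s) (some (cs.length : Int)) := by
  rw [PySem.List.slice_from (xs := cs) hs,
      PySem.List.slice_toNat (xs := cs) hs (by positivity)]
  simp

lemma pv_slice_empty_of_ge (cs : List Char) (s : Int) (hs : (cs.length : Int) ≤ s) :
    PySem.List.slice cs (some s) (some (cs.length : Int)) = [] := by
  rw [PySem.List.slice_toNat (xs := cs) (le_trans (by positivity) hs) (by positivity)]
  simp
  omega

lemma pv_main (cs : List Char) (ps : List Int) (s : Int) (cells : List String) (hs : 0 ≤ s) :
    pvAGo cs ps cells s = pvBCut cs cells s (pvBBounds (cs.length : Int) ps s ++ [(cs.length : Int)]) := by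
  induction ps generalizing s cells with
  | nil =>
    simp only [pvAGo, pvBBounds, List.nil_append, pvBCut]
    by_cases h : s < (cs.length : Int)
    · rw [if_pos h, pv_slice_from_eq_to_len cs s hs]
    · rw [if_neg h, pv_slice_empty_of_ge cs s (by omega)]
      simp [PySem.Chars.strip, PySem.Chars.lstrip, PySem.Chars.rstrip]
  | cons p ps ih =>
    simp only [pvAGo, pvBBounds]
    by_cases h : s < p ∧ p < (cs.length : Int)
    · rw [if_pos ⟨h.1, h.2⟩, if_pos h]
      simp only [List.cons_append, pvBCut]
      exact ih p _ (by omega)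
    · rw [if_neg (by tauto), if_neg h]
      exact ih s cells hs

-- ===== VERDICT (by name: the statement is the Claim_ definition above) =====
theorem extract_cells_by_position_py_spec : Claim_equal_extract_cells_by_position_py := by
  intro line positions _
  unfold Spec_extract_cells_by_position_py extract_cells_by_position_py extract_cells_by_position_py_alt
  exact pv_main line.toList positions 0 [] le_rfl
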